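-- pv_equiv track=rewrite | github.com/alumnos-ingcom/python-1-CandeCeruse | src/ejercicio6.py | ordenar_menor_a_mayor
-- ===== SOURCE A (Python) =====
-- def ordenar_menor_a_mayor(uno, dos, tres):
--     """
--     Esta funcion compara, a través de un for, los componentes
--     de la cadena. Y los reordena de menor a mayor.
--     """
--     cadena = [uno, dos, tres]
--     for i in range(2):
--         if cadena[i] > cadena[i+1]:
--             posicion_a = cadena[i]
--             posicion_b = cadena[i+1]
--             cadena[i] = posicion_b
--             cadena[i+1] = posicion_a
--     #Para ordenar los primeros digitos si se da una condicion
--     #de 3,2,1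
--     for i in range(2):
--         if cadena[i] > cadena[i+1]:
--             posicion_a = cadena[i]
--             posicion_b = cadena[i+1]
--             cadena[i] = posicion_b
--             cadena[i+1] = posicion_a
--     return cadena
-- ===== SOURCE B (Python) =====
-- def ordenar_menor_a_mayor(uno, dos, tres):
--     """Decision tree over the three values; <= keeps ties in input order
--     like A's stable strict-> bubble passes."""
--     if uno <= dos:
--         if dos <= tres:
--             return [uno, dos, tres]
--         elif uno <= tres:
--             return [uno, tres, dos]
--         else:
--             return [tres, uno, dos]
--     else:
--         if uno <= tres:
--             return [dos, uno, tres]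
--         elif dos <= tres:
--             return [dos, tres, uno]
--         else:
--             return [tres, dos, uno]
-- ===== Notes on version B (the rewrite author's own statement) =====
-- stated objective: simpler
-- what changed: Replaced the two in-place bubble passes over a list with a branching comparison decision tree that returns the ordered triple directly at each of the six leaves.
import Mathlib
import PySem

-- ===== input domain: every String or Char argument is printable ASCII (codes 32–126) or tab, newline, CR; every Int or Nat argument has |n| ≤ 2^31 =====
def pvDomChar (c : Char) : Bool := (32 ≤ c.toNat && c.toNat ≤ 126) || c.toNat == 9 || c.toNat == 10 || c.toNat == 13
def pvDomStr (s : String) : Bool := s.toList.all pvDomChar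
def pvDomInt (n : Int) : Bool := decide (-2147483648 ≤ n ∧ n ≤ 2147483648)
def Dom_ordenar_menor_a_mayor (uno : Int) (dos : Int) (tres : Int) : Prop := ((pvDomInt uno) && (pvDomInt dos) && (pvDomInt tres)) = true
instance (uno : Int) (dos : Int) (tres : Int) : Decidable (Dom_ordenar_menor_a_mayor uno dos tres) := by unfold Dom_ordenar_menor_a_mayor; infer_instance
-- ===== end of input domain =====

-- B: a comparison decision tree returning the ordered triple directly, instead of A's two bubble passes (simpler).


-- ===== PORT A =====
def pvPass (cadena : List Int) : List Int :=
  (List.range 2).foldl (fun c i =>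
    if c.getD i 0 > c.getD (i+1) 0 then
      let posicion_a := c.getD i 0
      let posicion_b := c.getD (i+1) 0
      ((c.set i posicion_b).set (i+1) posicion_a)
    else c) cadena

def ordenar_menor_a_mayor (uno : Int) (dos : Int) (tres : Int) : List Int :=
  pvPass (pvPass [uno, dos, tres])

-- ===== PORT B =====
def ordenar_menor_a_mayor_alt (uno : Int) (dos : Int) (tres : Int) : List Int :=
  if uno ≤ dos then
    if dos ≤ tres then [uno, dos, tres]
    else if uno ≤ tres then [uno, tres, dos]
    else [tres, uno, dos]
  else
    if uno ≤ tres then [dos, uno, tres]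
    else if dos ≤ tres then [dos, tres, uno]
    else [tres, dos, uno]

-- ===== PRECONDITION & SPEC =====
def Spec_ordenar_menor_a_mayor (uno : Int) (dos : Int) (tres : Int) (out : List Int) : Prop := out = ordenar_menor_a_mayor_alt uno dos tres
instance (uno : Int) (dos : Int) (tres : Int) (out : List Int) : Decidable (Spec_ordenar_menor_a_mayor uno dos tres out) := by unfold Spec_ordenar_menor_a_mayor; infer_instance

-- ===== CLAIM (what is proved, stated in full; the proofs are below) =====
def Claim_equal_ordenar_menor_a_mayor : Prop := ∀ (uno : Int) (dos : Int) (tres : Int), Dom_ordenar_menor_a_mayor uno dos tres → Spec_ordenar_menor_a_mayor uno dos tres (ordenar_menor_a_mayor uno dos tres)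

-- ===== LEMMAS AND PROOFS =====

-- ===== VERDICT (by name: the statement is the Claim_ definition above) =====
theorem ordenar_menor_a_mayor_spec : Claim_equal_ordenar_menor_a_mayor := by
  intro uno dos tres _
  unfold Spec_ordenar_menor_a_mayor ordenar_menor_a_mayor ordenar_menor_a_mayor_alt pvPass
  simp only [List.range_succ, List.range_zero, List.nil_append, List.foldl_append,
    List.foldl_cons, List.foldl_nil]
  norm_num [List.getD]
  split_ifs <;> simp_all <;> omega
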